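-- pv_equiv track=rewrite | github.com/angelo-wf/Exercises-Hanze-4 | AI/week3/opdracht4fs.py | get_lowest_column
-- ===== SOURCE A (Python) =====
-- def active_cols(col_active):
--     return [i for i in range(cols) if col_active[i]]
--
-- def active_rows(row_active):
--     return [i for i in range(rows) if row_active[i]]
--
-- def get_lowest_column(row_active, col_active):
--     lowest_col = None
--     lowest_count = rows # all rows 1 (which can't be the case)
--     for col in active_cols(col_active):
--         # col is not covered
--         count = 0
--         for row in active_rows(row_active):
--             count += matrix[row][col]
--         if count < lowest_count:
--             lowest_count = count
--             lowest_col = col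
--     return (lowest_col, lowest_count)
--
-- matrix = [
--     [0, 0, 1, 1, 0, 0],
--     [1, 1, 0, 0, 0, 0],
--     [0, 1, 0, 1, 0, 0],
--     [0, 0, 1, 0, 0, 1],
--     [1, 0, 0, 0, 0, 0],
--     [0, 0, 0, 1, 1, 0]
-- ]
--
-- rows = len(matrix)
--
-- cols = len(matrix[0])
-- ===== SOURCE B (Python) =====
-- matrix = [
--     [0, 0, 1, 1, 0, 0],
--     [1, 1, 0, 0, 0, 0],
--     [0, 1, 0, 1, 0, 0],
--     [0, 0, 1, 0, 0, 1],
--     [1, 0, 0, 0, 0, 0],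
--     [0, 0, 0, 1, 1, 0]
-- ]
-- rows = len(matrix)
-- cols = len(matrix[0])
--
-- def get_lowest_column(row_active, col_active):
--     # phase 1: one pass over the rows builds all column sums at once
--     counts = [0] * cols
--     for r in range(rows):
--         if row_active[r]:
--             counts = [c + v for c, v in zip(counts, matrix[r])]
--     # phase 2: select the first active column with the strictly lowest sum
--     best_col, best = None, rows
--     for c in range(cols):
--         if col_active[c] and counts[c] < best:
--             best_col, best = c, counts[c]
--     return (best_col, best)
-- ===== Notes on version B (the rewrite author's own statement) =====
-- stated objective: alternative
-- what changed: Replaces A's fused nested scan (per active column, re-scan the active rows and sum) by a two-phase table-then-select: one pass over the rows accumulates all column sums via zip, then a single pass over the columns picks the first strictly-lowest active column.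
-- outside the precondition, e.g. on get_lowest_column([], [False, False, False, False, False, False]): A returns (None, 6), B raises IndexError
import Mathlib
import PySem

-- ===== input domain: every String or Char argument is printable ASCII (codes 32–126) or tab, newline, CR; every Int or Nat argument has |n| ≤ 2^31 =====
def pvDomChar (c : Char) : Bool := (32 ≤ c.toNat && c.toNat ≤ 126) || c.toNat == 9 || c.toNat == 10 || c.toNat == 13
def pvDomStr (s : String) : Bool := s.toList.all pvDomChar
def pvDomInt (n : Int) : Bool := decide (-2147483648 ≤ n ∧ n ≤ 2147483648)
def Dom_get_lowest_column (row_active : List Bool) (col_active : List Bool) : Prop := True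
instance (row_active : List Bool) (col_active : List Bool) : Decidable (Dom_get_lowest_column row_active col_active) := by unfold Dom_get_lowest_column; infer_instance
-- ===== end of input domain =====

-- B replaces A's fused nested scan by a two-phase table-then-select (one row pass builds all
-- column sums via zip, then one column pass selects); same cost, different decomposition.


-- ===== PORT A =====
def pvMatrix : List (List Int) :=
  [[0, 0, 1, 1, 0, 0],
   [1, 1, 0, 0, 0, 0],
   [0, 1, 0, 1, 0, 0],
   [0, 0, 1, 0, 0, 1],
   [1, 0, 0, 0, 0, 0],
   [0, 0, 0, 1, 1, 0]]

-- active_cols / active_rows (indexing is total under Pre_, so getD is exact there)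
def pvActiveCols (col_active : List Bool) : List Nat :=
  (List.range 6).filter (fun i => col_active.getD i false)

def pvActiveRows (row_active : List Bool) : List Nat :=
  (List.range 6).filter (fun i => row_active.getD i false)

def get_lowest_column (row_active : List Bool) (col_active : List Bool) : Option Int × Int :=
  (pvActiveCols col_active).foldl
    (fun st col =>
      let count : Int :=
        (pvActiveRows row_active).foldl
          (fun c row => c + ((pvMatrix.getD row []).getD col 0)) 0
      if count < st.2 then (some (col : Int), count) else st)
    (none, 6)

-- ===== PORT B =====
def get_lowest_column_alt (row_active : List Bool) (col_active : List Bool) : Option Int × Int :=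
  -- phase 1: one pass over the rows builds all column sums at once
  let counts : List Int :=
    (List.range 6).foldl
      (fun counts r =>
        if row_active.getD r false then List.zipWith (· + ·) counts (pvMatrix.getD r [])
        else counts)
      (List.replicate 6 0)
  -- phase 2: select the first active column with the strictly lowest sum
  (List.range 6).foldl
    (fun st c =>
      if col_active.getD c false && decide (counts.getD c 0 < st.2) then
        (some (c : Int), counts.getD c 0)
      else st)
    (none, 6)

-- ===== PRECONDITION & SPEC =====
-- Pre_ requires both activity lists to cover the 6x6 matrix; A additionally happens to return
-- (None, 6) on a too-short row_active whenever no column is active (the row scan is never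
-- reached) — B's single row pass raises there, so those inputs are excluded.
def Pre_get_lowest_column (row_active : List Bool) (col_active : List Bool) : Prop :=
  6 ≤ row_active.length ∧ 6 ≤ col_active.length
instance (row_active : List Bool) (col_active : List Bool) : Decidable (Pre_get_lowest_column row_active col_active) := by unfold Pre_get_lowest_column; infer_instance

def pvWitness_get_lowest_column : List Bool × List Bool :=
  ([true, true, false, true, true, true], [true, false, true, true, true, true])

def Spec_get_lowest_column (row_active : List Bool) (col_active : List Bool) (out : Option Int × Int) : Prop := out = get_lowest_column_alt row_active col_active
instance (row_active : List Bool) (col_active : List Bool) (out : Option Int × Int) : Decidable (Spec_get_lowest_column row_active col_active out) := by unfold Spec_get_lowest_column; infer_instance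

-- ===== CLAIM (what is proved, stated in full; the proofs are below) =====
def Claim_equal_get_lowest_column : Prop := ∀ (row_active : List Bool) (col_active : List Bool), Dom_get_lowest_column row_active col_active → Pre_get_lowest_column row_active col_active → Spec_get_lowest_column row_active col_active (get_lowest_column row_active col_active)

-- ===== LEMMAS AND PROOFS =====

-- Both ports read only the first six entries of each list (getD i, i < 6), so the tails are
-- definitionally irrelevant and the remaining 2^12 boolean combinations are checked by decide.
theorem pv_tailA (a0 a1 a2 a3 a4 a5 b0 b1 b2 b3 b4 b5 : Bool) (ra ca : List Bool) :
    get_lowest_column (a0 :: a1 :: a2 :: a3 :: a4 :: a5 :: ra) (b0 :: b1 :: b2 :: b3 :: b4 :: b5 :: ca)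
      = get_lowest_column [a0, a1, a2, a3, a4, a5] [b0, b1, b2, b3, b4, b5] := rfl

theorem pv_tailB (a0 a1 a2 a3 a4 a5 b0 b1 b2 b3 b4 b5 : Bool) (ra ca : List Bool) :
    get_lowest_column_alt (a0 :: a1 :: a2 :: a3 :: a4 :: a5 :: ra) (b0 :: b1 :: b2 :: b3 :: b4 :: b5 :: ca)
      = get_lowest_column_alt [a0, a1, a2, a3, a4, a5] [b0, b1, b2, b3, b4, b5] := rfl

set_option maxHeartbeats 2000000 in
theorem pv_key : ∀ (a0 a1 a2 a3 a4 a5 b0 b1 b2 b3 b4 b5 : Bool),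
    get_lowest_column [a0, a1, a2, a3, a4, a5] [b0, b1, b2, b3, b4, b5]
      = get_lowest_column_alt [a0, a1, a2, a3, a4, a5] [b0, b1, b2, b3, b4, b5] := by decide

-- ===== VERDICT (by name: the statement is the Claim_ definition above) =====
theorem get_lowest_column_spec : Claim_equal_get_lowest_column := by
  intro ra ca _ hpre
  obtain ⟨hra, hca⟩ := hpre
  unfold Spec_get_lowest_column
  rcases ra with _ | ⟨a0, _ | ⟨a1, _ | ⟨a2, _ | ⟨a3, _ | ⟨a4, _ | ⟨a5, ra⟩⟩⟩⟩⟩⟩ <;>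
    simp only [List.length] at hra <;> try omega
  rcases ca with _ | ⟨b0, _ | ⟨b1, _ | ⟨b2, _ | ⟨b3, _ | ⟨b4, _ | ⟨b5, ca⟩⟩⟩⟩⟩⟩ <;>
    simp only [List.length] at hca <;> try omega
  rw [pv_tailA, pv_tailB]
  exact pv_key a0 a1 a2 a3 a4 a5 b0 b1 b2 b3 b4 b5
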